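-- pv_equiv track=rewrite | github.com/rnscks/TurningMillingGenerator | utils/tree_io.py | classify_trees_by_step_count
-- ===== SOURCE A (Python) =====
-- from typing import List, Dict, Optional, Tuple
--
-- def classify_trees_by_step_count(trees: List[Dict]) -> Dict[int, List[int]]:
--     """
--     트리를 step(s) 노드 개수별로 분류.
--
--     Args:
--         trees: 트리 딕셔너리 리스트
--
--     Returns:
--         {step_count: [tree_indices]} 형태의 딕셔너리
--     """
--     result = {}
--     for i, tree in enumerate(trees):
--         s_count = sum(1 for n in tree.get('nodes', []) if n.get('label') == 's')
--         if s_count not in result: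
--             result[s_count] = []
--         result[s_count].append(i)
--     return result
-- ===== SOURCE B (Python) =====
-- def classify_trees_by_step_count(trees):
--     # Stage 1: map each tree to its number of 's'-labelled nodes.
--     counts = [len([n for n in t.get('nodes', []) if n.get('label') == 's'])
--               for t in trees]
--     # Stage 2: partition loop — peel off one count class per iteration.
--     result = {}
--     pairs = list(enumerate(counts))
--     while pairs:
--         c = pairs[0][1]
--         result[c] = [i for i, x in pairs if x == c]
--         pairs = [(i, x) for i, x in pairs if x != c]
--     return result
-- ===== Notes on version B (the rewrite author's own statement) =====
-- stated objective: alternative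
-- what changed: Replaces A's single incremental-bucket pass (create-bucket-if-missing then append inside one enumerate loop) by a two-stage pipeline: first map trees to a counts list, then a partition loop that repeatedly takes the first remaining count, emits all its indices at once, and drops that class from the worklist.
import Mathlib
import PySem

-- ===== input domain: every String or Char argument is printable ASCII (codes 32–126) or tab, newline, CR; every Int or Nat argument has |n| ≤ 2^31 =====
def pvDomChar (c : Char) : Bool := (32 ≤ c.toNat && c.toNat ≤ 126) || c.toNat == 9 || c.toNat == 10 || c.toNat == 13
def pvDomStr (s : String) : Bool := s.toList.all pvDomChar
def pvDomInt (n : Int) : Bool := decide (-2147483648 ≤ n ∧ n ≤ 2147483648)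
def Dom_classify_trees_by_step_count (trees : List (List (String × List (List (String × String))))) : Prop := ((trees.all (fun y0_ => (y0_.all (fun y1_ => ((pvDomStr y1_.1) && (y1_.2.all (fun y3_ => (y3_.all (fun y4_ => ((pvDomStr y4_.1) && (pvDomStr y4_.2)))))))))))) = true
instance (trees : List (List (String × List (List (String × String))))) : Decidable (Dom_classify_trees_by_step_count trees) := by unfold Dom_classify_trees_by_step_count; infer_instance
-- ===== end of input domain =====

-- B replaces A's incremental-bucket loop by a counts map followed by a partition loop that peels off one count class per iteration (alternative decomposition, same result).


-- ===== PORT A =====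
-- s_count = sum(1 for n in tree.get('nodes', []) if n.get('label') == 's')
def pvSCountA (tree : List (String × List (List (String × String)))) : Int :=
  (PySem.Dict.getD (PySem.Dict.mk tree) "nodes" []).foldl
    (fun acc n => if (PySem.Dict.get? (PySem.Dict.mk n) "label") == some "s" then acc + 1 else acc) 0

def classify_trees_by_step_count (trees : List (List (String × List (List (String × String))))) : List (Int × List Int) :=
  let result : PySem.Dict Int (List Int) :=
    (PySem.List.enumerate trees).foldl
      (fun result p =>
        let s_count := pvSCountA p.2
        let result := if result.contains s_count then result else result.insert s_count []
        result.modify s_count [] (fun l => l ++ [p.1]))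
      PySem.Dict.empty
  result.items

-- ===== PORT B =====
-- len([n for n in t.get('nodes', []) if n.get('label') == 's'])
def pvSCountB (tree : List (String × List (List (String × String)))) : Int :=
  ((PySem.Dict.getD (PySem.Dict.mk tree) "nodes" []).filter
    (fun n => (PySem.Dict.get? (PySem.Dict.mk n) "label") == some "s")).length

-- Source B's while loop: take the first remaining pair's count c, emit all indices with
-- count c, keep only the pairs whose count differs, repeat until the worklist is empty.
def pvGroupLoop (pairs : List (Int × Int)) (result : PySem.Dict Int (List Int)) :
    PySem.Dict Int (List Int) :=
  match pairs with
  | [] => result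
  | (i, c) :: tl =>
      pvGroupLoop (((i, c) :: tl).filter (fun p => p.2 != c))
        (result.insert c ((((i, c) :: tl).filter (fun p => p.2 == c)).map Prod.fst))
termination_by pairs.length
decreasing_by
  simp only [List.filter_cons]
  have h : (c != c) = false := by simp
  simp only [h, if_neg Bool.false_ne_true, List.length_cons]
  have := List.length_filter_le (fun p : Int × Int => p.2 != c) tl
  omega

def classify_trees_by_step_count_alt (trees : List (List (String × List (List (String × String))))) : List (Int × List Int) :=
  let counts := trees.map pvSCountB
  (pvGroupLoop (PySem.List.enumerate counts) PySem.Dict.empty).items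

-- ===== PRECONDITION & SPEC =====
def Spec_classify_trees_by_step_count (trees : List (List (String × List (List (String × String))))) (out : List (Int × List Int)) : Prop := out = classify_trees_by_step_count_alt trees
instance (trees : List (List (String × List (List (String × String))))) (out : List (Int × List Int)) : Decidable (Spec_classify_trees_by_step_count trees out) := by unfold Spec_classify_trees_by_step_count; infer_instance

-- ===== CLAIM (what is proved, stated in full; the proofs are below) =====
def Claim_equal_classify_trees_by_step_count : Prop := ∀ (trees : List (List (String × List (List (String × String))))), Dom_classify_trees_by_step_count trees → Spec_classify_trees_by_step_count trees (classify_trees_by_step_count trees)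

-- ===== LEMMAS AND PROOFS =====

-- the canonical grouping both ports compute
def pvG (pairs : List (Int × Int)) : List (Int × List Int) :=
  (PySem.Set.ofList (pairs.map Prod.snd)).map
    (fun c => (c, (pairs.filter (fun p => p.2 == c)).map Prod.fst))

-- counting by fold = counting by filter-length
theorem pv_foldl_count {T : Type} (P : T → Bool) (xs : List T) (a : Int) :
    xs.foldl (fun acc n => if P n then acc + 1 else acc) a = a + (xs.filter P).length := by
  induction xs generalizing a with
  | nil => simp
  | cons x xs ih =>
    by_cases hx : P x
    · simp [List.filter_cons, hx, ih]; push_cast; ring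
    · have hx' : P x = false := by simpa using hx
      simp [List.filter_cons, hx', ih]

theorem pv_count_eq (tree : List (String × List (List (String × String)))) :
    pvSCountA tree = pvSCountB tree := by
  unfold pvSCountA pvSCountB
  rw [pv_foldl_count]
  simp

theorem pv_foldl_add_skip (xs s : List Int) (c : Int) (hc : c ∈ s) :
    xs.foldl PySem.Set.add s = (xs.filter (fun x => x != c)).foldl PySem.Set.add s := by
  induction xs generalizing s with
  | nil => rfl
  | cons x xs ih =>
    simp only [List.foldl_cons, List.filter_cons]
    by_cases hx : x = c
    · subst hx
      have hcon : PySem.Set.add s x = s := by simp [PySem.Set.add, hc]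
      rw [hcon]
      have hb : (x != x) = false := by simp
      rw [hb, if_neg Bool.false_ne_true]
      exact ih s hc
    · have hx' : (x != c) = true := by simp [hx]
      rw [hx', if_pos rfl, List.foldl_cons]
      exact ih _ (by simp [PySem.Set.add]; split <;> simp [hc])

theorem pv_foldl_add_front (xs s : List Int) (c : Int)
    (h : ∀ x ∈ xs, x ≠ c) :
    xs.foldl PySem.Set.add (c :: s) = c :: xs.foldl PySem.Set.add s := by
  induction xs generalizing s with
  | nil => rfl
  | cons x xs ih =>
    have hx : x ≠ c := h x (by simp)
    have hstep : PySem.Set.add (c :: s) x = c :: PySem.Set.add s x := by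
      by_cases hin : x ∈ s
      · simp [PySem.Set.add, hin]
      · simp [PySem.Set.add, hin, hx]
    simp only [List.foldl_cons, hstep]
    exact ih (PySem.Set.add s x) (fun y hy => h y (by simp [hy]))

theorem pv_ofList_cons (c : Int) (xs : List Int) :
    PySem.Set.ofList (c :: xs) = c :: PySem.Set.ofList (xs.filter (fun x => x != c)) := by
  have h0 : PySem.Set.ofList (c :: xs) = xs.foldl PySem.Set.add [c] := by
    simp [PySem.Set.ofList_eq_foldl, PySem.Set.add, PySem.Set.empty]
  rw [h0, pv_foldl_add_skip xs [c] c (by simp),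
    pv_foldl_add_front _ [] c (fun x hx => by simpa using (List.of_mem_filter hx))]
  simp [PySem.Set.ofList_eq_foldl, PySem.Set.empty]

-- the head class of pvG splits off
theorem pvG_cons (i c : Int) (tl : List (Int × Int)) :
    pvG ((i, c) :: tl)
      = (c, (((i, c) :: tl).filter (fun p => p.2 == c)).map Prod.fst)
        :: pvG (((i, c) :: tl).filter (fun p => p.2 != c)) := by
  have hrest : ((i, c) :: tl).filter (fun p => p.2 != c) = tl.filter (fun p => p.2 != c) := by
    simp [List.filter_cons]
  unfold pvG
  rw [hrest]
  have hmapf : (tl.filter (fun p => p.2 != c)).map Prod.snd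
      = (tl.map Prod.snd).filter (fun x => x != c) := by
    rw [List.filter_map]; rfl
  simp only [List.map_cons, pv_ofList_cons, ← hmapf, List.map_cons]
  congr 1
  apply List.map_congr_left
  intro c' hc'
  have hc'mem : c' ∈ (tl.filter (fun p => p.2 != c)).map Prod.snd :=
    (PySem.Set.mem_ofList _ _).mp hc'
  have hcc : c' ≠ c := by
    rcases List.mem_map.mp hc'mem with ⟨p, hp, hpc⟩
    have := List.of_mem_filter hp
    subst hpc; simpa using this
  have hhead : ((i, c) :: tl).filter (fun p => p.2 == c') = tl.filter (fun p => p.2 == c') := by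
    simp [List.filter_cons, Ne.symm hcc]
  rw [hhead, List.filter_filter]
  congr 1
  congr 1
  apply List.filter_congr
  intro p _
  by_cases hp : p.2 = c'
  · simp [hp, hcc]
  · simp [hp]

-- the partition loop appends the canonical grouping to the accumulated dict
theorem pv_loop_spec (pairs : List (Int × Int)) (acc : PySem.Dict Int (List Int))
    (hnd : acc.keys.Nodup) (hfresh : ∀ p ∈ pairs, acc.contains p.2 = false) :
    (pvGroupLoop pairs acc).items = acc.items ++ pvG pairs := by
  fun_induction pvGroupLoop pairs acc with
  | case1 acc => simp [pvG, PySem.Set.ofList_eq_foldl, PySem.Set.empty]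
  | case2 acc i c tl ih =>
    have hc : acc.contains c = false := hfresh (i, c) (by simp)
    have hnd' : (acc.insert c ((((i, c) :: tl).filter (fun p => p.2 == c)).map Prod.fst)).keys.Nodup :=
      PySem.Dict.nodup_keys_insert _ _ _ hnd
    have hfresh' : ∀ p ∈ ((i, c) :: tl).filter (fun p => p.2 != c),
        (acc.insert c ((((i, c) :: tl).filter (fun p => p.2 == c)).map Prod.fst)).contains p.2 = false := by
      intro p hp
      have hne : p.2 ≠ c := by simpa using List.of_mem_filter hp
      have hin : acc.contains p.2 = false := hfresh p (List.mem_of_mem_filter hp)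
      rw [PySem.Dict.contains_insert]
      simp [hne, hin]
    rw [ih hnd' hfresh',
      PySem.Dict.items_insert_of_not_contains _ _ hc, pvG_cons]
    simp

theorem pv_enumerate_map {α β : Type} (f : α → β) (xs : List α) (s : Int) :
    PySem.List.enumerate (xs.map f) s = (PySem.List.enumerate xs s).map (fun p => (p.1, f p.2)) := by
  induction xs generalizing s with
  | nil => simp [PySem.List.enumerate_nil]
  | cons x xs ih => simp [PySem.List.enumerate_cons, ih]

-- A gathers (count, index) pairs filtered on the first component; B filters
-- (index, count) pairs on the second: the projections agree.
theorem pv_gather {T : Type} (g : T → Int) (l : List (Int × T)) (c : Int) :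
    ((l.map (fun p => (g p.2, p.1))).filter (fun p => p.1 == c)).map (fun x => x.2)
      = ((l.map (fun p => (p.1, g p.2))).filter (fun p => p.2 == c)).map (fun x => x.1) := by
  induction l with
  | nil => rfl
  | cons x xs ih =>
    simp only [List.map_cons, List.filter_cons]
    by_cases h : g x.2 = c
    · simp [h, ih]
    · simp [h, ih]

theorem classify_eq (trees : List (List (String × List (List (String × String))))) :
    classify_trees_by_step_count trees = classify_trees_by_step_count_alt trees := by
  -- B side: the partition loop computes the canonical grouping pvG
  unfold classify_trees_by_step_count_alt
  have hB : (pvGroupLoop (PySem.List.enumerate (trees.map pvSCountB)) PySem.Dict.empty).items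
      = pvG (PySem.List.enumerate (trees.map pvSCountB)) := by
    rw [pv_loop_spec _ _ (by simp [PySem.Dict.nodup_keys_empty]) (by simp [PySem.Dict.contains_empty])]
    simp [PySem.Dict.items]; rfl
  rw [hB]
  have hcounts : trees.map pvSCountB = trees.map pvSCountA := by
    apply List.map_congr_left; intro t _; exact (pv_count_eq t).symm
  rw [hcounts]
  -- A side: the incremental-bucket fold also computes pvG
  unfold classify_trees_by_step_count
  have hstep :
      (fun (result : PySem.Dict Int (List Int)) (p : Int × List (String × List (List (String × String)))) =>
        let s_count := pvSCountA p.2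
        let result := if result.contains s_count then result else result.insert s_count []
        result.modify s_count [] (fun l => l ++ [p.1]))
      = (fun result p => result.modify (pvSCountA p.2) [] (fun l => l ++ [p.1])) := by
    funext d p
    show (if d.contains (pvSCountA p.2) then d else d.insert (pvSCountA p.2) []).modify
        (pvSCountA p.2) [] (fun l => l ++ [p.1]) = _
    by_cases h : d.contains (pvSCountA p.2)
    · simp [h]
    · have h' : d.contains (pvSCountA p.2) = false := by simpa using h
      simp [PySem.Dict.modify, h', PySem.Dict.getD_insert_self,
        PySem.Dict.insert_insert_self, PySem.Dict.getD_of_not_contains d [] h']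
  rw [hstep]
  set l := PySem.List.enumerate trees with hl
  have hfold :
      l.foldl (fun d p => d.modify (pvSCountA p.2) [] (fun x => x ++ [p.1])) PySem.Dict.empty
        = (l.map (fun p => (pvSCountA p.2, p.1))).foldl
            (fun d p => d.modify p.1 [] (fun x => x ++ [p.2])) PySem.Dict.empty := by
    rw [List.foldl_map]
  rw [hfold]
  set d := (l.map (fun p => (pvSCountA p.2, p.1))).foldl
      (fun d p => d.modify p.1 [] (fun x => x ++ [p.2])) PySem.Dict.empty with hd
  have hmapfst : (l.map (fun p => (pvSCountA p.2, p.1))).map (fun q => q.1)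
      = trees.map pvSCountA := by
    rw [List.map_map]
    have h2 : l.map ((fun (q : Int × Int) => q.1) ∘ (fun p => (pvSCountA p.2, p.1)))
        = (l.map (fun p => p.2)).map pvSCountA := by
      rw [List.map_map]; rfl
    rw [h2, hl, PySem.List.map_snd_enumerate]
  have henum : PySem.List.enumerate (trees.map pvSCountA)
      = l.map (fun p => (p.1, pvSCountA p.2)) := by
    rw [hl]; exact pv_enumerate_map pvSCountA trees 0
  rw [henum]
  unfold pvG
  have hsnd : (l.map (fun p => (p.1, pvSCountA p.2))).map Prod.snd
      = trees.map pvSCountA := by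
    rw [List.map_map]
    have h2 : l.map (Prod.snd ∘ (fun p => (p.1, pvSCountA p.2)))
        = (l.map (fun p => p.2)).map pvSCountA := by
      rw [List.map_map]; rfl
    rw [h2, hl, PySem.List.map_snd_enumerate]
  rw [hsnd]
  have hkeys : d.keys = PySem.Set.ofList (trees.map pvSCountA) := by
    rw [hd, PySem.Dict.keys_foldl_modify_key (l.map (fun p => (pvSCountA p.2, p.1)))
        (fun q => q.1) [] (fun _ q => fun x => x ++ [q.2]) PySem.Dict.empty,
      PySem.Dict.keys_empty, PySem.Set.update_nil_left, hmapfst]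
  have hnodup : d.keys.Nodup := by
    rw [hkeys]; exact PySem.Set.nodup_ofList _
  rw [PySem.Dict.items_eq_map_keys d hnodup [], hkeys]
  apply List.map_congr_left
  intro c _
  have hget : d.getD c [] = ((l.map (fun p => (pvSCountA p.2, p.1))).filter
      (fun p => p.1 == c)).map (fun x => x.2) := by
    rw [hd, PySem.Dict.getD_foldl_modify_append, PySem.Dict.getD_empty]
    simp
  rw [hget, pv_gather pvSCountA l c]

-- ===== VERDICT (by name: the statement is the Claim_ definition above) =====
theorem classify_trees_by_step_count_spec : Claim_equal_classify_trees_by_step_count := by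
  intro trees _
  unfold Spec_classify_trees_by_step_count
  exact classify_eq trees
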